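-- pv_equiv track=rewrite | github.com/jflam/text-is-all-you-need | ingest/doc.py | extract_facts_questions_and_context
-- ===== SOURCE A (Python) =====
-- def extract_facts_questions_and_context(response: str) -> list[str]:
--     facts = []
--     questions = []
--     context = []
--     context_mode = False
--     for line in response.splitlines():
--         if line.startswith("New Context:"):
--             context.append(line[12:].strip())
--             context_mode = True
--         else:
--             if context_mode:
--                 context.append(line)
--             elif line.startswith("F:"):
--                 facts.append(line[2:].strip())
--             elif line.startswith("Q:"):
--                 questions.append(line[2:].strip())
--
--     return facts, questions, " ".join(context)
-- ===== SOURCE B (Python) =====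
-- def extract_facts_questions_and_context(response: str) -> list[str]:
--     lines = response.splitlines()
--     idx = next((i for i, l in enumerate(lines) if l.startswith("New Context:")), len(lines))
--     head = lines[:idx]
--     facts = [l[2:].strip() for l in head if l.startswith("F:")]
--     questions = [l[2:].strip() for l in head if l.startswith("Q:")]
--     context = [l[12:].strip() if l.startswith("New Context:") else l for l in lines[idx:]]
--     return facts, questions, " ".join(context)
-- ===== Notes on version B (the rewrite author's own statement) =====
-- stated objective: simpler
-- what changed: Replaces A's single stateful loop threading a context_mode flag by locating the first boundary line with findIdx and building facts/questions from filter/map comprehensions over the lines before it and the context from a map over the lines from it on.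
import Mathlib
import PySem

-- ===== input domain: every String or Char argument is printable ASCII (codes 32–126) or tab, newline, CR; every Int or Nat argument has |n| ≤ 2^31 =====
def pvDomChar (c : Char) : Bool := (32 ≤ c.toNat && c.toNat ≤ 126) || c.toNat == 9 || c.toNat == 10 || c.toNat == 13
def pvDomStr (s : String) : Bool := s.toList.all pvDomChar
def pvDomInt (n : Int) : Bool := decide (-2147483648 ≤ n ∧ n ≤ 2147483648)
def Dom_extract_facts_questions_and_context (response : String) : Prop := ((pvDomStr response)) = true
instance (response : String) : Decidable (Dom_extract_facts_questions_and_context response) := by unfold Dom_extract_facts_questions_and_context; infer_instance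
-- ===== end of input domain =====

-- B replaces A's stateful context_mode loop by locating the first "New Context:" line and
-- building facts/questions/context from the two halves with filter/map passes (objective: simpler decomposition, same cost).

-- ===== PORT A =====
-- A's loop body, one step per line over the state (facts, questions, context, context_mode)
def pvStepA (st : List String × List String × List String × Bool) (line : String) :
    List String × List String × List String × Bool :=
  let (facts, questions, context, context_mode) := st
  if PySem.Str.startswith line "New Context:" then
    (facts, questions, context ++ [PySem.Str.strip (PySem.Str.slice line (some 12) none)], true)
  else if context_mode then
    (facts, questions, context ++ [line], context_mode)
  else if PySem.Str.startswith line "F:" then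
    (facts ++ [PySem.Str.strip (PySem.Str.slice line (some 2) none)], questions, context, context_mode)
  else if PySem.Str.startswith line "Q:" then
    (facts, questions ++ [PySem.Str.strip (PySem.Str.slice line (some 2) none)], context, context_mode)
  else (facts, questions, context, context_mode)

def extract_facts_questions_and_context (response : String) : List String × List String × String :=
  let st := (PySem.Str.splitlines response).foldl pvStepA ([], [], [], false)
  (st.1, st.2.1, PySem.Str.join " " st.2.2.1)

-- ===== PORT B =====
-- processing of one line once the "New Context:" boundary has been reached
def pvCtxLine (l : String) : String :=
  if PySem.Str.startswith l "New Context:" then PySem.Str.strip (PySem.Str.slice l (some 12) none) else l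

def extract_facts_questions_and_context_alt (response : String) : List String × List String × String :=
  let lines := PySem.Str.splitlines response
  let idx := lines.findIdx (fun l => PySem.Str.startswith l "New Context:")
  let head := lines.take idx
  let facts := (head.filter (fun l => PySem.Str.startswith l "F:")).map
      (fun l => PySem.Str.strip (PySem.Str.slice l (some 2) none))
  let questions := (head.filter (fun l => PySem.Str.startswith l "Q:")).map
      (fun l => PySem.Str.strip (PySem.Str.slice l (some 2) none))
  let context := (lines.drop idx).map pvCtxLine
  (facts, questions, PySem.Str.join " " context)

-- ===== PRECONDITION & SPEC =====
def Spec_extract_facts_questions_and_context (response : String) (out : List String × List String × String) : Prop := out = extract_facts_questions_and_context_alt response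
instance (response : String) (out : List String × List String × String) : Decidable (Spec_extract_facts_questions_and_context response out) := by unfold Spec_extract_facts_questions_and_context; infer_instance

-- ===== CLAIM (what is proved, stated in full; the proofs are below) =====
def Claim_equal_extract_facts_questions_and_context : Prop := ∀ (response : String), Dom_extract_facts_questions_and_context response → Spec_extract_facts_questions_and_context response (extract_facts_questions_and_context response)

-- ===== LEMMAS AND PROOFS =====

-- a line starting with "F:" does not start with "Q:" (A's elif vs B's two filters)
theorem pvNotQ (l : String) (hf : PySem.Chars.startswith l.toList ['F', ':'] = true) :
    PySem.Chars.startswith l.toList ['Q', ':'] = false := by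
  rw [PySem.Chars.startswith_iff] at hf
  by_contra hq
  simp only [Bool.not_eq_false, PySem.Chars.startswith_iff] at hq
  obtain ⟨t1, e1⟩ := hf
  obtain ⟨t2, e2⟩ := hq
  rw [← e1] at e2
  simp at e2

-- once context_mode is true, A only appends pvCtxLine of every remaining line
theorem pvFoldA_true (ls : List String) (f q c : List String) :
    ls.foldl pvStepA (f, q, c, true) = (f, q, c ++ ls.map pvCtxLine, true) := by
  induction ls generalizing c with
  | nil => simp
  | cons l ls ih =>
    by_cases h : PySem.Str.startswith l "New Context:" = true <;>
      simp at h <;>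
      simp [List.foldl, pvStepA, h, ih, pvCtxLine]

-- before the boundary, A's fold is B's filter/map decomposition around findIdx
theorem pvFoldA_false (ls : List String) (f q c : List String) :
    ls.foldl pvStepA (f, q, c, false) =
      (f ++ ((ls.take (ls.findIdx (fun l => PySem.Str.startswith l "New Context:"))).filter
              (fun l => PySem.Str.startswith l "F:")).map
              (fun l => PySem.Str.strip (PySem.Str.slice l (some 2) none)),
       q ++ ((ls.take (ls.findIdx (fun l => PySem.Str.startswith l "New Context:"))).filter
              (fun l => PySem.Str.startswith l "Q:")).map
              (fun l => PySem.Str.strip (PySem.Str.slice l (some 2) none)),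
       c ++ (ls.drop (ls.findIdx (fun l => PySem.Str.startswith l "New Context:"))).map pvCtxLine,
       ls.any (fun l => PySem.Str.startswith l "New Context:")) := by
  induction ls generalizing f q c with
  | nil => simp
  | cons l ls ih =>
    by_cases h : PySem.Str.startswith l "New Context:" = true
    · simp at h
      simp [List.foldl, pvStepA, h, pvFoldA_true, pvCtxLine, List.findIdx_cons]
    · simp at h
      by_cases hf : PySem.Str.startswith l "F:" = true
      · simp at hf
        simp [List.foldl, pvStepA, h, hf, pvNotQ l hf, ih, List.findIdx_cons]
      · simp at hf
        by_cases hq : PySem.Str.startswith l "Q:" = true <;>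
          simp at hq <;>
          simp [List.foldl, pvStepA, h, hf, hq, ih, List.findIdx_cons]

-- ===== VERDICT (by name: the statement is the Claim_ definition above) =====
theorem extract_facts_questions_and_context_spec : Claim_equal_extract_facts_questions_and_context := by
  intro response _
  unfold Spec_extract_facts_questions_and_context extract_facts_questions_and_context
    extract_facts_questions_and_context_alt
  simp [pvFoldA_false]
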